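-- pv_equiv track=rewrite | github.com/MrBrantCode/unitest_baseline | mut_generate/mist_train_taco/taco_13468/solution.py | check_unit_consistency
-- ===== SOURCE A (Python) =====
-- def check_unit_consistency(n, relationships):
--     if n == 0:
--         return True
--
--     dic = {}
--     for (name1, val, name2) in relationships:
--         val = int(val)
--         if name1 not in dic:
--             dic[name1] = {}
--         if name2 not in dic:
--             dic[name2] = {}
--         dic[name1][name2] = val
--         dic[name2][name1] = -val
--
--     keys = list(dic.keys())
--     score = {key: None for key in keys}
--
--     def search(key):
--         now = score[key]
--         for to in dic[key]:
--             if score[to] is None: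
--                 score[to] = now + dic[key][to]
--                 if not search(to):
--                     return False
--             if score[to] != now + dic[key][to]:
--                 return False
--         return True
--
--     for key in keys:
--         if score[key] is not None:
--             continue
--         score[key] = 0
--         if not search(key):
--             return False
--
--     return True
-- ===== SOURCE B (Python) =====
-- def check_unit_consistency(n, relationships):
--     if n == 0:
--         return True
--
--     # flat edge-weight map keyed by ordered pairs + per-node neighbor order lists
--     weight = {}
--     adj = {}
--     for (a, v, b) in relationships:
--         v = int(v)
--         if a not in adj:
--             adj[a] = []
--         if b not in adj:
--             adj[b] = []
--         if (a, b) not in weight: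
--             adj[a].append(b)
--         weight[(a, b)] = v
--         if (b, a) not in weight:
--             adj[b].append(a)
--         weight[(b, a)] = -v
--
--     score = {}
--     for start in adj:
--         if start in score:
--             continue
--         score[start] = 0
--         stack = [(start, 0)]
--         while stack:
--             key, i = stack.pop()
--             nbrs = adj[key]
--             if i >= len(nbrs):
--                 continue
--             stack.append((key, i + 1))
--             to = nbrs[i]
--             want = score[key] + weight[(key, to)]
--             if to in score:
--                 if score[to] != want:
--                     return False
--             else:
--                 score[to] = want
--                 stack.append((to, 0))
--     return True
-- ===== Notes on version B (the rewrite author's own statement) =====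
-- stated objective: alternative
-- what changed: The nested dict-of-dicts plus recursive closure DFS is replaced by a flat edge-weight map keyed by ordered (node,node) pairs together with per-node neighbor-order lists, traversed by an iterative DFS over an explicit stack of (node, next-neighbor-index) frames, so no nested dicts and no recursion.
import Mathlib
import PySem

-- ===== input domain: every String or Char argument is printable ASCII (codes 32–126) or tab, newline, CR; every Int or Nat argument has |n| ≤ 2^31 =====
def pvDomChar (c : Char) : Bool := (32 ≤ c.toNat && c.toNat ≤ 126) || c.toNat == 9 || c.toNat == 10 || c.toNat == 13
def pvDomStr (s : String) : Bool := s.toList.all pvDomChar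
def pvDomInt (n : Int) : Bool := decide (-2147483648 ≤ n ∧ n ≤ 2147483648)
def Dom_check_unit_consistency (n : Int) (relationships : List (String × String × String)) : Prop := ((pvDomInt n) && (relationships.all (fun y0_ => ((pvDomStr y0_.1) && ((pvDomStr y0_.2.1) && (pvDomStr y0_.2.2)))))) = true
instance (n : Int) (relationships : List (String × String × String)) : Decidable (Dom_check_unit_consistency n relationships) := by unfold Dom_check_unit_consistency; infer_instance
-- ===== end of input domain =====

-- B replaces A's nested dict-of-dicts + recursive closure DFS by a flat edge-weight map keyed
-- by ordered pairs plus per-node neighbor lists, walked by an iterative DFS over an explicit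
-- stack of (node, next-neighbor-index) frames (objective: alternative).
-- Both ports use a Nat fuel, threaded linearly and consumed once per DFS push, purely as a
-- totalization device; the initial fuel (number of keys) exceeds the possible number of pushes,
-- so it is never exhausted on a real run.

-- ===== PORT A =====
-- A-side helpers: the graph dict and its accessors
def pvBuildA : List (String × String × String) → PySem.Dict String (PySem.Dict String Int) → PySem.Dict String (PySem.Dict String Int)
  | [], dic => dic
  | (name1, val, name2) :: rest, dic =>
    -- val = int(val); Pre_ excludes the ValueError inputs, so the getD 0 default is never used
    let v : Int := (PySem.Int.ofStr? val).getD 0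
    let dic := if dic.contains name1 then dic else dic.insert name1 PySem.Dict.empty
    let dic := if dic.contains name2 then dic else dic.insert name2 PySem.Dict.empty
    let dic := dic.insert name1 ((dic.getD name1 PySem.Dict.empty).insert name2 v)
    let dic := dic.insert name2 ((dic.getD name2 PySem.Dict.empty).insert name1 (-v))
    pvBuildA rest dic

def pvNbrsA (dic : PySem.Dict String (PySem.Dict String Int)) (k : String) : List String :=
  (dic.getD k PySem.Dict.empty).keys

def pvValA (dic : PySem.Dict String (PySem.Dict String Int)) (k tgt : String) : Int :=
  (dic.getD k PySem.Dict.empty).getD tgt 0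

-- `search`, with its `for to in dic[key]` loop made explicit: the recursive call search(to) is
-- inlined (its first line `now = score[to]` reads back the value `now + v` just stored).
-- Returns (result, score, remaining fuel); the `min fuel2 fuel'` is a totalization no-op
-- (lemma pvLoopA_fuel_le below: the returned fuel never exceeds the fuel passed in).
def pvLoopA (dic : PySem.Dict String (PySem.Dict String Int)) (fuel : Nat) (key : String) (now : Int)
    (tos : List String) (score : PySem.Dict String (Option Int)) :
    Bool × PySem.Dict String (Option Int) × Nat :=
  match tos with
  | [] => (true, score, fuel)
  | tgt :: rest =>
    let v := pvValA dic key tgt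
    match score.getD tgt none with
    | none =>
      match fuel with
      | 0 => (false, score, 0)
      | fuel' + 1 =>
        let score1 := score.insert tgt (some (now + v))
        match pvLoopA dic fuel' tgt (now + v) (pvNbrsA dic tgt) score1 with
        | (false, score2, fuel2) => (false, score2, fuel2)
        | (true, score2, fuel2) =>
          if score2.getD tgt none ≠ some (now + v) then (false, score2, fuel2)
          else pvLoopA dic (min fuel2 fuel') key now rest score2
    | some s =>
      if s ≠ now + v then (false, score, fuel)
      else pvLoopA dic fuel key now rest score
termination_by (fuel, tos.length)
decreasing_by
  all_goals first
    | exact Prod.Lex.left _ _ (Nat.lt_succ_self _)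
    | exact Prod.Lex.left _ _ (Nat.lt_succ_of_le (Nat.min_le_right _ _))
    | exact Prod.Lex.right _ (Nat.lt_succ_self _)

-- the trailing `for key in keys` loop of A
def pvOuterA (dic : PySem.Dict String (PySem.Dict String Int)) :
    Nat → List String → PySem.Dict String (Option Int) → Bool
  | _, [], _ => true
  | fuel, key :: rest, score =>
    match score.getD key none with
    | some _ => pvOuterA dic fuel rest score
    | none =>
      let score1 := score.insert key (some (0 : Int))
      match pvLoopA dic fuel key 0 (pvNbrsA dic key) score1 with
      | (false, _, _) => false
      | (true, score2, fuel2) => pvOuterA dic fuel2 rest score2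

def check_unit_consistency (n : Int) (relationships : List (String × String × String)) : Bool :=
  if n = 0 then true
  else
    let dic := pvBuildA relationships PySem.Dict.empty
    let keys := dic.keys
    let score := keys.foldl (fun s k => s.insert k (none : Option Int)) PySem.Dict.empty
    pvOuterA dic keys.length keys score

-- ===== PORT B =====
-- the edge-building loop of B: weight[(a,b)] flat map + adj[a] neighbor-order lists
def pvBuildB : List (String × String × String) →
    PySem.Dict String (List String) → PySem.Dict (String × String) Int →
    PySem.Dict String (List String) × PySem.Dict (String × String) Int
  | [], adj, w => (adj, w)
  | (a, vs, b) :: rest, adj, w =>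
    -- v = int(v); Pre_ excludes the ValueError inputs, so the getD 0 default is never used
    let x : Int := (PySem.Int.ofStr? vs).getD 0
    let adj := if adj.contains a then adj else adj.insert a []
    let adj := if adj.contains b then adj else adj.insert b []
    let adj := if w.contains (a, b) then adj else adj.insert a ((adj.getD a []) ++ [b])
    let w := w.insert (a, b) x
    let adj := if w.contains (b, a) then adj else adj.insert b ((adj.getD b []) ++ [a])
    let w := w.insert (b, a) (-x)
    pvBuildB rest adj w

-- termination measure lemmas for pvRunB (cited by name in its decreasing_by)
theorem pvMeasPop (adj : PySem.Dict String (List String)) (key : String) (i : Nat)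
    (rest : List (String × Nat)) :
    ((rest.map (fun f => (adj.getD f.1 []).length - f.2 + 1)).sum)
      < ((((key, i) :: rest).map (fun f => (adj.getD f.1 []).length - f.2 + 1)).sum) := by
  simp only [List.map_cons, List.sum_cons]
  exact Nat.lt_add_of_pos_left (Nat.succ_pos _)

theorem pvMeasStep (adj : PySem.Dict String (List String)) (key : String) (i : Nat)
    (rest : List (String × Nat)) (h : i < (adj.getD key []).length) :
    ((((key, i + 1) :: rest).map (fun f => (adj.getD f.1 []).length - f.2 + 1)).sum)
      < ((((key, i) :: rest).map (fun f => (adj.getD f.1 []).length - f.2 + 1)).sum) := by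
  simp only [List.map_cons, List.sum_cons]
  exact Nat.add_lt_add_right (Nat.succ_lt_succ (Nat.sub_succ_lt_self _ _ h)) _

-- the `while stack:` loop of B; frames are (node, index of next neighbor to process);
-- fuel is the same totalization device as on the A side, consumed once per push
def pvRunB (adj : PySem.Dict String (List String)) (w : PySem.Dict (String × String) Int) :
    Nat → List (String × Nat) → PySem.Dict String Int →
    Bool × PySem.Dict String Int × Nat
  | fuel, [], score => (true, score, fuel)
  | fuel, (key, i) :: rest, score =>
    if h : i < (adj.getD key []).length then
      let tgt := (adj.getD key [])[i]
      let want := score.getD key 0 + w.getD (key, tgt) 0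
      match score.get? tgt with
      | some s =>
        if s ≠ want then (false, score, fuel)
        else pvRunB adj w fuel ((key, i + 1) :: rest) score
      | none =>
        match fuel with
        | 0 => (false, score, 0)
        | fuel' + 1 =>
          pvRunB adj w fuel' ((tgt, 0) :: (key, i + 1) :: rest) (score.insert tgt want)
    else pvRunB adj w fuel rest score
termination_by fuel stack _ => (fuel, (stack.map (fun f => (adj.getD f.1 []).length - f.2 + 1)).sum)
decreasing_by
  all_goals first
    | exact Prod.Lex.left _ _ (Nat.lt_succ_self _)
    | exact Prod.Lex.right _ (pvMeasStep _ _ _ _ h)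
    | exact Prod.Lex.right _ (pvMeasPop _ _ _ _)

-- the `for start in adj:` loop of B
def pvOuterB (adj : PySem.Dict String (List String)) (w : PySem.Dict (String × String) Int) :
    Nat → List String → PySem.Dict String Int → Bool
  | _, [], _ => true
  | fuel, start :: rest, score =>
    if score.contains start then pvOuterB adj w fuel rest score
    else
      match pvRunB adj w fuel [(start, 0)] (score.insert start (0 : Int)) with
      | (false, _, _) => false
      | (true, score2, fuel2) => pvOuterB adj w fuel2 rest score2

def check_unit_consistency_alt (n : Int) (relationships : List (String × String × String)) : Bool :=
  if n = 0 then true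
  else
    let aw := pvBuildB relationships PySem.Dict.empty PySem.Dict.empty
    pvOuterB aw.1 aw.2 aw.1.keys.length aw.1.keys PySem.Dict.empty

-- ===== PRECONDITION & SPEC =====
-- Pre_ excludes exactly the inputs where A raises ValueError: some relationship value string
-- does not parse as a Python int (only reachable when n ≠ 0, since A returns early on n == 0).
def Pre_check_unit_consistency (n : Int) (relationships : List (String × String × String)) : Prop :=
  n = 0 ∨ ∀ r ∈ relationships, (PySem.Int.ofStr? r.2.1).isSome

instance (n : Int) (relationships : List (String × String × String)) : Decidable (Pre_check_unit_consistency n relationships) := by unfold Pre_check_unit_consistency; infer_instance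

def pvWitness_check_unit_consistency : Int × (List (String × String × String)) :=
  (3, [("m", "100", "cm"), ("km", "1000", "m")])

def Spec_check_unit_consistency (n : Int) (relationships : List (String × String × String)) (out : Bool) : Prop := out = check_unit_consistency_alt n relationships
instance (n : Int) (relationships : List (String × String × String)) (out : Bool) : Decidable (Spec_check_unit_consistency n relationships out) := by unfold Spec_check_unit_consistency; infer_instance

-- ===== CLAIM (what is proved, stated in full; the proofs are below) =====
def Claim_equal_check_unit_consistency : Prop := ∀ (n : Int) (relationships : List (String × String × String)), Dom_check_unit_consistency n relationships → Pre_check_unit_consistency n relationships → Spec_check_unit_consistency n relationships (check_unit_consistency n relationships)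

-- ===== LEMMAS AND PROOFS =====

-- ---- generic facts about the "ensure key exists" idiom shared by both builds ----
theorem pvGetD_ensure {κ ν : Type} [BEq κ] [LawfulBEq κ] (d : PySem.Dict κ ν) (k k' : κ) (e : ν) :
    (if d.contains k then d else d.insert k e).getD k' e = d.getD k' e := by
  split_ifs with hc
  · rfl
  · by_cases hk : k' = k
    · subst hk
      rw [PySem.Dict.getD_insert_self, PySem.Dict.getD_of_not_contains _ _ (by simpa using hc)]
    · rw [PySem.Dict.getD_insert_of_ne _ _ _ hk]

theorem pvKeys_ensure {κ ν : Type} [BEq κ] [LawfulBEq κ] (d : PySem.Dict κ ν) (k : κ) (e : ν) :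
    (if d.contains k then d else d.insert k e).keys
      = if d.contains k then d.keys else d.keys ++ [k] := by
  split_ifs with hc
  · rfl
  · exact PySem.Dict.keys_insert_of_not_contains _ _ (by simpa using hc)

theorem pvContains_ensure {κ ν : Type} [BEq κ] [LawfulBEq κ] (d : PySem.Dict κ ν) (k k' : κ) (e : ν) :
    (if d.contains k then d else d.insert k e).contains k' = (k' == k || d.contains k') := by
  split_ifs with hc
  · by_cases hk : k' = k
    · subst hk; simp [hc]
    · simp [hk]
  · rw [PySem.Dict.contains_insert]

-- ---- the representation invariant: A's nested dict vs B's (adjacency lists, pair-keyed weights) ----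
def pvRep (dic : PySem.Dict String (PySem.Dict String Int)) (adj : PySem.Dict String (List String))
    (w : PySem.Dict (String × String) Int) : Prop :=
  dic.keys = adj.keys ∧
  (∀ k, (dic.getD k PySem.Dict.empty).keys = adj.getD k []) ∧
  (∀ k t, (dic.getD k PySem.Dict.empty).get? t = w.get? (k, t))

theorem pvRep_step (dic : PySem.Dict String (PySem.Dict String Int))
    (adj : PySem.Dict String (List String)) (w : PySem.Dict (String × String) Int)
    (a b : String) (x : Int) (h : pvRep dic adj w)
    (dic1 dic2 dic3 dic4 : PySem.Dict String (PySem.Dict String Int))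
    (adj1 adj2 adj3 adj4 : PySem.Dict String (List String))
    (w1 w2 : PySem.Dict (String × String) Int)
    (h1 : dic1 = if dic.contains a then dic else dic.insert a PySem.Dict.empty)
    (h2 : dic2 = if dic1.contains b then dic1 else dic1.insert b PySem.Dict.empty)
    (h3 : dic3 = dic2.insert a ((dic2.getD a PySem.Dict.empty).insert b x))
    (h4 : dic4 = dic3.insert b ((dic3.getD b PySem.Dict.empty).insert a (-x)))
    (g1 : adj1 = if adj.contains a then adj else adj.insert a [])
    (g2 : adj2 = if adj1.contains b then adj1 else adj1.insert b [])
    (g3 : adj3 = if w.contains (a, b) then adj2 else adj2.insert a ((adj2.getD a []) ++ [b]))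
    (gw1 : w1 = w.insert (a, b) x)
    (g4 : adj4 = if w1.contains (b, a) then adj3 else adj3.insert b ((adj3.getD b []) ++ [a]))
    (gw2 : w2 = w1.insert (b, a) (-x)) :
    pvRep dic4 adj4 w2 := by
  obtain ⟨hK, hN, hV⟩ := h
  -- transfer facts between the two representations
  have hc : ∀ k, dic.contains k = adj.contains k := by
    intro k
    rw [PySem.Dict.contains_eq_decide_mem_keys, PySem.Dict.contains_eq_decide_mem_keys, hK]
  have hcb : ∀ k t, (dic.getD k PySem.Dict.empty).contains t = w.contains (k, t) := by
    intro k t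
    rw [PySem.Dict.contains_eq_isSome_get?, PySem.Dict.contains_eq_isSome_get?, hV]
  -- the two "ensure" inserts change no getD
  have F1 : ∀ k, dic2.getD k PySem.Dict.empty = dic.getD k PySem.Dict.empty := by
    intro k; rw [h2, pvGetD_ensure, h1, pvGetD_ensure]
  have G1 : ∀ k, adj2.getD k [] = adj.getD k [] := by
    intro k; rw [g2, pvGetD_ensure, g1, pvGetD_ensure]
  have c1 : ∀ k, dic1.contains k = adj1.contains k := by
    intro k; rw [h1, g1, pvContains_ensure, pvContains_ensure, hc k]
  have c2 : ∀ k, dic2.contains k = adj2.contains k := by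
    intro k; rw [h2, g2, pvContains_ensure, pvContains_ensure, c1 k]
  have keys11 : dic1.keys = adj1.keys := by
    rw [h1, g1, pvKeys_ensure, pvKeys_ensure, hK, hc a]
  have keys12 : dic2.keys = adj2.keys := by
    rw [h2, g2, pvKeys_ensure, pvKeys_ensure, keys11, c1 b]
  have ca1 : dic1.contains a = true := by rw [h1, pvContains_ensure]; simp
  have ca2 : dic2.contains a = true := by rw [h2, pvContains_ensure, ca1]; simp
  have cb2 : dic2.contains b = true := by rw [h2, pvContains_ensure]; simp
  have aa2 : adj2.contains a = true := by rw [← c2]; exact ca2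
  have ab2 : adj2.contains b = true := by rw [← c2]; exact cb2
  -- cond1 / cond2, expressed on the A side
  have hcond1 : w.contains (a, b) = (dic.getD a PySem.Dict.empty).contains b := (hcb a b).symm
  have hcond2 : w1.contains (b, a) = ((b, a) == (a, b) || (dic.getD b PySem.Dict.empty).contains a) := by
    rw [gw1, PySem.Dict.contains_insert, hcb b a]
  refine ⟨?_, ?_, ?_⟩
  · -- keys
    have k3 : dic3.keys = dic2.keys := by
      rw [h3]; exact PySem.Dict.keys_insert_of_contains _ _ ca2
    have k4 : dic4.keys = dic3.keys := by
      rw [h4]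
      refine PySem.Dict.keys_insert_of_contains _ _ ?_
      rw [h3, PySem.Dict.contains_insert, cb2]; simp
    have j3 : adj3.keys = adj2.keys := by
      rw [g3]; split_ifs with hw
      · rfl
      · exact PySem.Dict.keys_insert_of_contains _ _ aa2
    have a3b : adj3.contains b = true := by
      rw [g3]; split_ifs with hw
      · exact ab2
      · rw [PySem.Dict.contains_insert, ab2]; simp
    have j4 : adj4.keys = adj3.keys := by
      rw [g4]; split_ifs with hw
      · rfl
      · exact PySem.Dict.keys_insert_of_contains _ _ a3b
    rw [k4, k3, j4, j3, keys12]
  · -- neighbor lists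
    intro k
    have d3b : dic3.getD b PySem.Dict.empty
        = if b = a then (dic.getD a PySem.Dict.empty).insert b x else dic.getD b PySem.Dict.empty := by
      rw [h3]
      by_cases hba : b = a
      · subst hba; rw [PySem.Dict.getD_insert_self, F1]; simp
      · rw [PySem.Dict.getD_insert_of_ne _ _ _ hba, F1]; simp [hba]
    have j3 : ∀ k', adj3.getD k' []
        = if ¬ w.contains (a, b) ∧ k' = a then adj.getD a [] ++ [b] else adj.getD k' [] := by
      intro k'
      rw [g3]
      by_cases hw : w.contains (a, b)
      · rw [if_pos hw, if_neg (by simp [hw]), G1]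
      · rw [if_neg hw]
        by_cases hka : k' = a
        · subst hka; rw [PySem.Dict.getD_insert_self, if_pos ⟨hw, rfl⟩, G1]
        · rw [PySem.Dict.getD_insert_of_ne _ _ _ hka, if_neg (fun hh => hka hh.2), G1]
    by_cases hkb : k = b
    · subst hkb
      have lhs4 : dic4.getD k PySem.Dict.empty = (dic3.getD k PySem.Dict.empty).insert a (-x) := by
        rw [h4, PySem.Dict.getD_insert_self]
      rw [lhs4, g4]
      by_cases hba : k = a
      · -- self edge: a = b = k
        subst hba
        rw [d3b, if_pos rfl]
        have hco : ((dic.getD k PySem.Dict.empty).insert k x).contains k = true := by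
          rw [PySem.Dict.contains_insert]; simp
        rw [PySem.Dict.keys_insert_of_contains _ _ hco]
        rw [if_pos (by rw [hcond2]; simp)]
        rw [j3 k, hcond1]
        by_cases hOld : (dic.getD k PySem.Dict.empty).contains k
        · rw [PySem.Dict.keys_insert_of_contains _ _ hOld, if_neg (by simp [hOld]), hN]
        · rw [PySem.Dict.keys_insert_of_not_contains _ _ (by simpa using hOld),
              if_pos ⟨by simp [hOld], rfl⟩, hN]
      · -- k = b, b ≠ a
        rw [d3b, if_neg hba]
        have hcond2' : w1.contains (k, a) = (dic.getD k PySem.Dict.empty).contains a := by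
          rw [hcond2]; simp [hba]
        rw [hcond2']
        have hj3k : adj3.getD k [] = adj.getD k [] := by
          rw [j3 k, if_neg (by intro hh; exact hba hh.2)]
        by_cases hOld : (dic.getD k PySem.Dict.empty).contains a
        · rw [PySem.Dict.keys_insert_of_contains _ _ hOld, if_pos hOld, hj3k, hN]
        · rw [PySem.Dict.keys_insert_of_not_contains _ _ (by simpa using hOld),
              if_neg (by simp [hOld]), PySem.Dict.getD_insert_self, hj3k, hN]
    · -- k ≠ b
      have lhs4 : dic4.getD k PySem.Dict.empty = dic3.getD k PySem.Dict.empty := by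
        rw [h4, PySem.Dict.getD_insert_of_ne _ _ _ hkb]
      have rhs4 : adj4.getD k [] = adj3.getD k [] := by
        rw [g4]; split_ifs with hw
        · rfl
        · rw [PySem.Dict.getD_insert_of_ne _ _ _ hkb]
      rw [lhs4, rhs4, j3 k]
      by_cases hka : k = a
      · subst hka
        rw [h3, PySem.Dict.getD_insert_self, F1, hcond1]
        by_cases hOld : (dic.getD k PySem.Dict.empty).contains b
        · rw [PySem.Dict.keys_insert_of_contains _ _ hOld, if_neg (by simp [hOld]), hN]
        · rw [PySem.Dict.keys_insert_of_not_contains _ _ (by simpa using hOld),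
              if_pos ⟨by simp [hOld], rfl⟩, hN]
      · rw [h3, PySem.Dict.getD_insert_of_ne _ _ _ hka, F1,
            if_neg (by intro hh; exact hka hh.2), hN]
  · -- edge values
    intro k t
    have rhsw : w2.get? (k, t)
        = if (k, t) = (b, a) then some (-x) else if (k, t) = (a, b) then some x else w.get? (k, t) := by
      rw [gw2, PySem.Dict.get?_insert, gw1, PySem.Dict.get?_insert]
    by_cases hkb : k = b
    · subst hkb
      have lhs4 : dic4.getD k PySem.Dict.empty = (dic3.getD k PySem.Dict.empty).insert a (-x) := by
        rw [h4, PySem.Dict.getD_insert_self]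
      rw [lhs4, rhsw, PySem.Dict.get?_insert]
      by_cases hta : t = a
      · subst hta; simp
      · rw [if_neg hta, if_neg (by simp [hta])]
        by_cases hba : k = a
        · subst hba
          rw [h3, PySem.Dict.getD_insert_self, F1, PySem.Dict.get?_insert]
          by_cases htb : t = k
          · subst htb; simp
          · rw [if_neg htb, if_neg (by simp [htb]), hV]
        · rw [h3, PySem.Dict.getD_insert_of_ne _ _ _ hba, F1,
              if_neg (by intro hh; exact hba (by injection hh)), hV]
    · have lhs4 : dic4.getD k PySem.Dict.empty = dic3.getD k PySem.Dict.empty := by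
        rw [h4, PySem.Dict.getD_insert_of_ne _ _ _ hkb]
      rw [lhs4, rhsw, if_neg (by intro hh; exact hkb (by injection hh))]
      by_cases hka : k = a
      · subst hka
        rw [h3, PySem.Dict.getD_insert_self, F1, PySem.Dict.get?_insert]
        by_cases htb : t = b
        · subst htb; simp
        · rw [if_neg htb, if_neg (by intro hh; injection hh with _ hh2; exact htb hh2), hV]
      · rw [h3, PySem.Dict.getD_insert_of_ne _ _ _ hka, F1,
            if_neg (by intro hh; exact hka (by injection hh)), hV]

theorem pvBuild_rep : ∀ (rels : List (String × String × String))
    (dic : PySem.Dict String (PySem.Dict String Int)) (adj : PySem.Dict String (List String))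
    (w : PySem.Dict (String × String) Int), pvRep dic adj w →
    pvRep (pvBuildA rels dic) (pvBuildB rels adj w).1 (pvBuildB rels adj w).2 := by
  intro rels
  induction rels with
  | nil => intro dic adj w h; exact h
  | cons r rest ih =>
    intro dic adj w h
    obtain ⟨a, vs, b⟩ := r
    simp only [pvBuildA, pvBuildB]
    exact ih _ _ _ (pvRep_step dic adj w a b _ h _ _ _ _ _ _ _ _ _ _
      rfl rfl rfl rfl rfl rfl rfl rfl rfl rfl)

theorem pvRep_empty : pvRep PySem.Dict.empty PySem.Dict.empty PySem.Dict.empty := by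
  refine ⟨rfl, ?_, ?_⟩
  · intro k; simp [PySem.Dict.getD_empty, PySem.Dict.keys_empty]
  · intro k t; simp [PySem.Dict.getD_empty, PySem.Dict.get?_empty]

-- ---- A-side technical lemmas (fuel is a no-op; scores are never overwritten) ----
theorem pvLoopA_fuel_le (dic : PySem.Dict String (PySem.Dict String Int)) (fuel : Nat)
    (key : String) (now : Int) (tos : List String) (score : PySem.Dict String (Option Int)) :
    (pvLoopA dic fuel key now tos score).2.2 ≤ fuel := by
  induction fuel, key, now, tos, score using pvLoopA.induct dic with
  | case1 => simp [pvLoopA]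
  | case2 key now score tgt rest h => simp [pvLoopA, h]
  | case3 key now score tgt rest v h fuel' score1 score2 fuel2 heq ih =>
    simp only [v, score1] at heq ih
    rw [pvLoopA.eq_def]; simp only [h, heq]
    rw [heq] at ih; simpa using Nat.le_succ_of_le ih
  | case4 key now score tgt rest v h fuel' score1 score2 fuel2 heq hne ih =>
    simp only [v, score1] at heq hne ih
    rw [pvLoopA.eq_def]; simp only [h, heq]
    rw [if_pos hne]
    rw [heq] at ih; simp at ih ⊢; omega
  | case5 key now score tgt rest v h fuel' score1 score2 fuel2 heq hne ih1 ih2 =>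
    simp only [v, score1] at heq hne ih1 ih2
    rw [pvLoopA.eq_def]; simp only [h, heq]
    rw [if_neg hne]
    simp only [Nat.succ_eq_add_one] at ih2 ⊢
    omega
  | case6 fuel key now score tgt rest v s hs hne =>
    simp only [v] at hne
    rw [pvLoopA.eq_def]; simp [hs, hne]
  | case7 fuel key now score tgt rest v s hs hne ih =>
    simp only [v] at hne ih
    rw [pvLoopA.eq_def]; simp [hs, hne] at *; exact ih

theorem pvLoopA_pres (dic : PySem.Dict String (PySem.Dict String Int)) (fuel : Nat)
    (key : String) (now : Int) (tos : List String) (score : PySem.Dict String (Option Int)) :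
    ∀ (k : String) (v : Int), score.getD k none = some v →
      (pvLoopA dic fuel key now tos score).2.1.getD k none = some v := by
  induction fuel, key, now, tos, score using pvLoopA.induct dic with
  | case1 => intro k v hkv; simpa [pvLoopA] using hkv
  | case2 key now score tgt rest h => intro k v hkv; simpa [pvLoopA, h] using hkv
  | case3 key now score tgt rest w h fuel' score1 score2 fuel2 heq ih =>
    intro k v hkv
    simp only [w, score1] at heq ih
    rw [pvLoopA.eq_def]; simp only [h, heq]
    rw [heq] at ih
    have hk : k ≠ tgt := by intro he; rw [he, h] at hkv; exact absurd hkv (by simp)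
    exact ih k v (by rw [PySem.Dict.getD_insert]; simp [hk, hkv])
  | case4 key now score tgt rest w h fuel' score1 score2 fuel2 heq hne ih =>
    intro k v hkv
    simp only [w, score1] at heq hne ih
    rw [pvLoopA.eq_def]; simp only [h, heq]
    rw [if_pos hne]
    rw [heq] at ih
    have hk : k ≠ tgt := by intro he; rw [he, h] at hkv; exact absurd hkv (by simp)
    exact ih k v (by rw [PySem.Dict.getD_insert]; simp [hk, hkv])
  | case5 key now score tgt rest w h fuel' score1 score2 fuel2 heq hne ih1 ih2 =>
    intro k v hkv
    simp only [w, score1] at heq hne ih1 ih2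
    rw [pvLoopA.eq_def]; simp only [h, heq]
    rw [if_neg hne]
    rw [heq] at ih1
    have hk : k ≠ tgt := by intro he; rw [he, h] at hkv; exact absurd hkv (by simp)
    exact ih2 k v (ih1 k v (by rw [PySem.Dict.getD_insert]; simp [hk, hkv]))
  | case6 fuel key now score tgt rest w s hs hne =>
    intro k v hkv
    simp only [w] at hne
    rw [pvLoopA.eq_def]; simpa [hs, hne] using hkv
  | case7 fuel key now score tgt rest w s hs hne ih =>
    intro k v hkv
    simp only [w] at hne ih
    rw [pvLoopA.eq_def]; simp [hs, hne]
    exact ih k v hkv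

-- ---- one-step rewriting lemmas for B's while loop ----
theorem pvRunB_pop (adj : PySem.Dict String (List String)) (w : PySem.Dict (String × String) Int)
    (fuel : Nat) (key : String) (i : Nat) (rest : List (String × Nat)) (s : PySem.Dict String Int)
    (h : (adj.getD key []).length ≤ i) :
    pvRunB adj w fuel ((key, i) :: rest) s = pvRunB adj w fuel rest s := by
  rw [pvRunB.eq_def]; simp [Nat.not_lt.mpr h]

theorem pvRunB_mismatch (adj : PySem.Dict String (List String)) (w : PySem.Dict (String × String) Int)
    (fuel : Nat) (key : String) (i : Nat) (rest : List (String × Nat)) (s : PySem.Dict String Int)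
    (h : i < (adj.getD key []).length) (v : Int) (hs : s.get? ((adj.getD key [])[i]'h) = some v)
    (hx : v ≠ s.getD key 0 + w.getD (key, (adj.getD key [])[i]'h) 0) :
    pvRunB adj w fuel ((key, i) :: rest) s = (false, s, fuel) := by
  rw [pvRunB.eq_def]; simp [h, hs, hx]

theorem pvRunB_match (adj : PySem.Dict String (List String)) (w : PySem.Dict (String × String) Int)
    (fuel : Nat) (key : String) (i : Nat) (rest : List (String × Nat)) (s : PySem.Dict String Int)
    (h : i < (adj.getD key []).length)
    (hs : s.get? ((adj.getD key [])[i]'h) = some (s.getD key 0 + w.getD (key, (adj.getD key [])[i]'h) 0)) :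
    pvRunB adj w fuel ((key, i) :: rest) s = pvRunB adj w fuel ((key, i + 1) :: rest) s := by
  rw [pvRunB.eq_def]; simp [h, hs]

theorem pvRunB_push_zero (adj : PySem.Dict String (List String)) (w : PySem.Dict (String × String) Int)
    (key : String) (i : Nat) (rest : List (String × Nat)) (s : PySem.Dict String Int)
    (h : i < (adj.getD key []).length) (hs : s.get? ((adj.getD key [])[i]'h) = none) :
    pvRunB adj w 0 ((key, i) :: rest) s = (false, s, 0) := by
  rw [pvRunB.eq_def]; simp [h, hs]

theorem pvRunB_push (adj : PySem.Dict String (List String)) (w : PySem.Dict (String × String) Int)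
    (fuel' : Nat) (key : String) (i : Nat) (rest : List (String × Nat)) (s : PySem.Dict String Int)
    (h : i < (adj.getD key []).length) (hs : s.get? ((adj.getD key [])[i]'h) = none) :
    pvRunB adj w (fuel' + 1) ((key, i) :: rest) s =
      pvRunB adj w fuel' (((adj.getD key [])[i]'h, 0) :: (key, i + 1) :: rest)
        (s.insert ((adj.getD key [])[i]'h) (s.getD key 0 + w.getD (key, (adj.getD key [])[i]'h) 0)) := by
  rw [pvRunB.eq_def]; simp [h, hs]

-- the score dicts of the two sides are related: B's score has exactly the keys A's score maps
-- to `some _`, with the same value (A pre-fills every key with None, B omits unvisited keys)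
def pvRel (sA : PySem.Dict String (Option Int)) (sB : PySem.Dict String Int) : Prop :=
  ∀ k, sB.get? k = sA.getD k none

-- ---- the simulation: A's recursive DFS vs B's explicit (node, index) stack ----
theorem pvSim (dic : PySem.Dict String (PySem.Dict String Int))
    (adj : PySem.Dict String (List String)) (w : PySem.Dict (String × String) Int)
    (hN : ∀ k, pvNbrsA dic k = adj.getD k [])
    (hV : ∀ k t, pvValA dic k t = w.getD (k, t) 0)
    (fuel : Nat) (key : String) (now : Int) (tos : List String)
    (sA : PySem.Dict String (Option Int)) :
    ∀ (sB : PySem.Dict String Int) (stack : List (String × Nat)) (i : Nat),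
      pvRel sA sB → sA.getD key none = some now → tos = (adj.getD key []).drop i →
      match pvLoopA dic fuel key now tos sA with
      | (false, _, _) => (pvRunB adj w fuel ((key, i) :: stack) sB).1 = false
      | (true, sA', fuel') => ∃ sB', pvRel sA' sB' ∧
          pvRunB adj w fuel ((key, i) :: stack) sB = pvRunB adj w fuel' stack sB' := by
  induction fuel, key, now, tos, sA using pvLoopA.induct dic with
  | case1 fuel key now score =>
    intro sB stack i hRel hnow htos
    have hlen : (adj.getD key []).length ≤ i := by
      rw [← List.drop_eq_nil_iff]; exact htos.symm
    simp only [pvLoopA]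
    exact ⟨sB, hRel, pvRunB_pop adj w fuel key i stack sB hlen⟩
  | case2 key now score tgt rest h =>
    intro sB stack i hRel hnow htos
    have hlen : i < (adj.getD key []).length := by
      by_contra hle
      rw [List.drop_eq_nil_iff.mpr (by omega)] at htos
      exact absurd htos (by simp)
    have hcd := (List.getElem_cons_drop hlen).trans htos.symm
    injection hcd with hget hrest
    have hBtgt : sB.get? ((adj.getD key [])[i]'hlen) = none := by
      rw [hget]; exact (hRel tgt).trans h
    rw [pvLoopA.eq_def]; simp only [h]
    rw [pvRunB_push_zero adj w key i stack sB hlen hBtgt]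
  | case3 key now score tgt rest v h fuel' score1 score2 fuel2 heq ih =>
    intro sB stack i hRel hnow htos
    simp only [v, score1] at heq ih
    simp only [heq] at ih
    have hlen : i < (adj.getD key []).length := by
      by_contra hle
      rw [List.drop_eq_nil_iff.mpr (by omega)] at htos
      exact absurd htos (by simp)
    have hcd := (List.getElem_cons_drop hlen).trans htos.symm
    injection hcd with hget hrest
    have hBtgt : sB.get? ((adj.getD key [])[i]'hlen) = none := by
      rw [hget]; exact (hRel tgt).trans h
    have hBnow : sB.getD key 0 = now := by
      rw [PySem.Dict.getD_eq_get?_getD, hRel key, hnow]; rfl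
    rw [pvLoopA.eq_def]; simp only [h, heq]
    rw [pvRunB_push adj w fuel' key i stack sB hlen hBtgt, hget, hBnow, ← hV key tgt]
    have hRel1 : pvRel (score.insert tgt (some (now + pvValA dic key tgt)))
        (sB.insert tgt (now + pvValA dic key tgt)) := by
      intro y
      rw [PySem.Dict.get?_insert, PySem.Dict.getD_insert]
      split_ifs with hy
      · rfl
      · exact hRel y
    have h1 : (score.insert tgt (some (now + pvValA dic key tgt))).getD tgt none
        = some (now + pvValA dic key tgt) := by rw [PySem.Dict.getD_insert]; simp
    have htos0 : pvNbrsA dic tgt = (adj.getD tgt []).drop 0 := by rw [hN, List.drop_zero]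
    exact ih _ ((key, i + 1) :: stack) 0 hRel1 h1 htos0
  | case4 key now score tgt rest v h fuel' score1 score2 fuel2 heq hne ih =>
    intro sB stack i hRel hnow htos
    simp only [v, score1] at heq hne
    have hp := pvLoopA_pres dic fuel' tgt (now + pvValA dic key tgt) (pvNbrsA dic tgt)
      (score.insert tgt (some (now + pvValA dic key tgt))) tgt (now + pvValA dic key tgt)
      (by rw [PySem.Dict.getD_insert]; simp)
    rw [heq] at hp
    exact absurd hp hne
  | case5 key now score tgt rest v h fuel' score1 score2 fuel2 heq hne ih1 ih2 =>
    intro sB stack i hRel hnow htos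
    simp only [v, score1] at heq hne ih1 ih2
    simp only [heq] at ih1
    have hlen : i < (adj.getD key []).length := by
      by_contra hle
      rw [List.drop_eq_nil_iff.mpr (by omega)] at htos
      exact absurd htos (by simp)
    have hcd := (List.getElem_cons_drop hlen).trans htos.symm
    injection hcd with hget hrest
    have hBtgt : sB.get? ((adj.getD key [])[i]'hlen) = none := by
      rw [hget]; exact (hRel tgt).trans h
    have hBnow : sB.getD key 0 = now := by
      rw [PySem.Dict.getD_eq_get?_getD, hRel key, hnow]; rfl
    have hfle : fuel2 ≤ fuel' := by
      have hl := pvLoopA_fuel_le dic fuel' tgt (now + pvValA dic key tgt) (pvNbrsA dic tgt)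
        (score.insert tgt (some (now + pvValA dic key tgt)))
      rw [heq] at hl; exact hl
    have hmin : min fuel2 fuel' = fuel2 := Nat.min_eq_left hfle
    rw [hmin] at ih2
    rw [pvLoopA.eq_def]; simp only [h, heq]
    rw [if_neg hne, hmin]
    rw [pvRunB_push adj w fuel' key i stack sB hlen hBtgt, hget, hBnow, ← hV key tgt]
    have hRel1 : pvRel (score.insert tgt (some (now + pvValA dic key tgt)))
        (sB.insert tgt (now + pvValA dic key tgt)) := by
      intro y
      rw [PySem.Dict.get?_insert, PySem.Dict.getD_insert]
      split_ifs with hy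
      · rfl
      · exact hRel y
    have h1 : (score.insert tgt (some (now + pvValA dic key tgt))).getD tgt none
        = some (now + pvValA dic key tgt) := by rw [PySem.Dict.getD_insert]; simp
    have htos0 : pvNbrsA dic tgt = (adj.getD tgt []).drop 0 := by rw [hN, List.drop_zero]
    obtain ⟨sB2, hRel2, hrun⟩ := ih1 (sB.insert tgt (now + pvValA dic key tgt))
      ((key, i + 1) :: stack) 0 hRel1 h1 htos0
    have hnow1 : (score.insert tgt (some (now + pvValA dic key tgt))).getD key none
        = some now := by
      rw [PySem.Dict.getD_insert]
      split_ifs with hk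
      · rw [hk] at hnow; rw [hnow] at h; exact absurd h (by simp)
      · exact hnow
    have hnow2 : score2.getD key none = some now := by
      have hp := pvLoopA_pres dic fuel' tgt (now + pvValA dic key tgt) (pvNbrsA dic tgt)
        (score.insert tgt (some (now + pvValA dic key tgt))) key now hnow1
      rw [heq] at hp; exact hp
    have hrest' : rest = (adj.getD key []).drop (i + 1) := hrest.symm
    have hcont := ih2 sB2 stack (i + 1) hRel2 hnow2 hrest'
    rcases hc : pvLoopA dic fuel2 key now rest score2 with ⟨ok, sA', fuelO⟩
    rw [hc] at hcont
    cases ok with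
    | false => exact hrun ▸ hcont
    | true =>
      obtain ⟨sB3, hR3, he3⟩ := hcont
      exact ⟨sB3, hR3, by rw [hrun, he3]⟩
  | case6 fuel key now score tgt rest v s hs hne =>
    intro sB stack i hRel hnow htos
    simp only [v] at hne
    have hlen : i < (adj.getD key []).length := by
      by_contra hle
      rw [List.drop_eq_nil_iff.mpr (by omega)] at htos
      exact absurd htos (by simp)
    have hcd := (List.getElem_cons_drop hlen).trans htos.symm
    injection hcd with hget hrest
    have hBs : sB.get? ((adj.getD key [])[i]'hlen) = some s := by
      rw [hget]; exact (hRel tgt).trans hs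
    have hBnow : sB.getD key 0 = now := by
      rw [PySem.Dict.getD_eq_get?_getD, hRel key, hnow]; rfl
    rw [pvLoopA.eq_def]; simp only [hs]
    rw [if_pos hne]
    rw [pvRunB_mismatch adj w fuel key i stack sB hlen s hBs
      (by rw [hget, hBnow, ← hV key tgt]; exact hne)]
  | case7 fuel key now score tgt rest v s hs hne ih =>
    intro sB stack i hRel hnow htos
    simp only [v] at hne ih
    simp only [ne_eq, Decidable.not_not] at hne
    have hlen : i < (adj.getD key []).length := by
      by_contra hle
      rw [List.drop_eq_nil_iff.mpr (by omega)] at htos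
      exact absurd htos (by simp)
    have hcd := (List.getElem_cons_drop hlen).trans htos.symm
    injection hcd with hget hrest
    have hBnow : sB.getD key 0 = now := by
      rw [PySem.Dict.getD_eq_get?_getD, hRel key, hnow]; rfl
    have hBs : sB.get? ((adj.getD key [])[i]'hlen)
        = some (sB.getD key 0 + w.getD (key, (adj.getD key [])[i]'hlen) 0) := by
      rw [hget, (hRel tgt).trans hs, hne, hBnow, ← hV key tgt]
    rw [pvLoopA.eq_def]; simp only [hs]
    rw [if_neg (by simpa using hne)]
    rw [pvRunB_match adj w fuel key i stack sB hlen hBs]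
    have hrest' : rest = (adj.getD key []).drop (i + 1) := hrest.symm
    exact ih sB stack (i + 1) hRel hnow hrest'

-- ---- the outer loops agree ----
theorem pvOuter_eq (dic : PySem.Dict String (PySem.Dict String Int))
    (adj : PySem.Dict String (List String)) (w : PySem.Dict (String × String) Int)
    (hN : ∀ k, pvNbrsA dic k = adj.getD k [])
    (hV : ∀ k t, pvValA dic k t = w.getD (k, t) 0) :
    ∀ (keys : List String) (fuel : Nat) (sA : PySem.Dict String (Option Int))
      (sB : PySem.Dict String Int), pvRel sA sB →
      pvOuterA dic fuel keys sA = pvOuterB adj w fuel keys sB := by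
  intro keys
  induction keys with
  | nil => intro fuel sA sB _; rfl
  | cons key rest ih =>
    intro fuel sA sB hRel
    cases hk : sA.getD key none with
    | some x =>
      have hB : sB.contains key = true := by
        rw [PySem.Dict.contains_eq_isSome_get?, hRel, hk]; rfl
      simp only [pvOuterA, pvOuterB, hk, hB, if_true]
      exact ih fuel sA sB hRel
    | none =>
      have hB : sB.contains key = false := by
        rw [PySem.Dict.contains_eq_isSome_get?, hRel, hk]; rfl
      simp only [pvOuterA, pvOuterB, hk, hB, Bool.false_eq_true, if_false]
      have hRel1 : pvRel (sA.insert key (some (0 : Int))) (sB.insert key (0 : Int)) := by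
        intro y
        rw [PySem.Dict.get?_insert, PySem.Dict.getD_insert]
        split_ifs with hy
        · rfl
        · exact hRel y
      have h0 : (sA.insert key (some (0 : Int))).getD key none = some 0 := by
        rw [PySem.Dict.getD_insert]; simp
      have hs := pvSim dic adj w hN hV fuel key 0 (pvNbrsA dic key)
        (sA.insert key (some (0 : Int))) (sB.insert key (0 : Int)) [] 0 hRel1 h0
        (by rw [hN, List.drop_zero])
      rcases hc : pvLoopA dic fuel key 0 (pvNbrsA dic key) (sA.insert key (some (0 : Int)))
        with ⟨ok, sA2, fuel2⟩
      rw [hc] at hs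
      cases ok with
      | false =>
        rcases hr : pvRunB adj w fuel [(key, 0)] (sB.insert key (0 : Int))
          with ⟨okB, sB2, f2⟩
        rw [hr] at hs
        simp at hs
        subst hs
        rfl
      | true =>
        obtain ⟨sB2, hRel2, hrun⟩ := hs
        have hrun' : pvRunB adj w fuel [(key, 0)] (sB.insert key (0 : Int))
            = (true, sB2, fuel2) := by rw [hrun, pvRunB]
        rw [hrun']
        exact ih fuel2 sA2 sB2 hRel2

theorem pvInitRel_aux (keys : List String) (sA : PySem.Dict String (Option Int))
    (h : ∀ k, sA.getD k none = none) (k : String) :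
    (keys.foldl (fun s k => s.insert k (none : Option Int)) sA).getD k none = none := by
  induction keys generalizing sA with
  | nil => exact h k
  | cons x xs ih =>
    simp only [List.foldl_cons]
    exact ih _ (fun k' => by rw [PySem.Dict.getD_insert]; split_ifs <;> simp [h])

theorem pvInitRel (keys : List String) :
    pvRel (keys.foldl (fun s k => s.insert k (none : Option Int)) PySem.Dict.empty)
      PySem.Dict.empty := by
  intro k
  rw [pvInitRel_aux keys PySem.Dict.empty (fun k' => by simp [PySem.Dict.getD_empty])]
  simp [PySem.Dict.get?_empty]

-- ===== VERDICT (by name: the statement is the Claim_ definition above) =====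
theorem check_unit_consistency_spec : Claim_equal_check_unit_consistency := by
  intro n rels _ _
  unfold Spec_check_unit_consistency check_unit_consistency check_unit_consistency_alt
  by_cases h : n = 0
  · simp [h]
  · simp only [h, if_false]
    have hrep := pvBuild_rep rels PySem.Dict.empty PySem.Dict.empty PySem.Dict.empty pvRep_empty
    obtain ⟨hK, hN, hV⟩ := hrep
    have hN' : ∀ k, pvNbrsA (pvBuildA rels PySem.Dict.empty) k
        = (pvBuildB rels PySem.Dict.empty PySem.Dict.empty).1.getD k [] := hN
    have hV' : ∀ k t, pvValA (pvBuildA rels PySem.Dict.empty) k t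
        = (pvBuildB rels PySem.Dict.empty PySem.Dict.empty).2.getD (k, t) 0 := by
      intro k t
      rw [pvValA, PySem.Dict.getD_eq_get?_getD, hV, ← PySem.Dict.getD_eq_get?_getD]
    rw [← hK]
    exact pvOuter_eq _ _ _ hN' hV' _ _ _ _ (pvInitRel _)
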